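-- pv_equiv track=rewrite | github.com/MLGRasirus420/Playfair | domaci_ukol_03/adfgvx.py | decode_trans
-- ===== SOURCE A (Python) =====
-- def decode_trans(ordered_list):
--     trans_string = ''
--     while ordered_list:
--         try:
--             for element in ordered_list:
--                 trans_string += element.pop(0)
--         except IndexError:
--             return trans_string
-- ===== SOURCE B (Python) =====
-- # Row-major readout by index instead of destructive pop(0): compute the shortest
-- # column length n, emit the n full rows, then the partial row up to the first
-- # shortest column.  Unlike A, this does not mutate the inner lists (the return
-- # value is identical).
-- def decode_trans(ordered_list):
--     if not ordered_list:
--         return None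
--     n = min(len(col) for col in ordered_list)
--     full = [col[i] for i in range(n) for col in ordered_list]
--     rest = []
--     for col in ordered_list:
--         if len(col) == n:
--             break
--         rest.append(col[n])
--     return ''.join(full + rest)
-- ===== Notes on version B (the rewrite author's own statement) =====
-- stated objective: alternative
-- what changed: B replaces A's destructive round-by-round pop(0) loop (which mutates its argument) with a non-mutating index-based readout: compute the shortest column length n, emit the n full rows by direct indexing, then the partial row up to the first shortest column, and join once.
import Mathlib
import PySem

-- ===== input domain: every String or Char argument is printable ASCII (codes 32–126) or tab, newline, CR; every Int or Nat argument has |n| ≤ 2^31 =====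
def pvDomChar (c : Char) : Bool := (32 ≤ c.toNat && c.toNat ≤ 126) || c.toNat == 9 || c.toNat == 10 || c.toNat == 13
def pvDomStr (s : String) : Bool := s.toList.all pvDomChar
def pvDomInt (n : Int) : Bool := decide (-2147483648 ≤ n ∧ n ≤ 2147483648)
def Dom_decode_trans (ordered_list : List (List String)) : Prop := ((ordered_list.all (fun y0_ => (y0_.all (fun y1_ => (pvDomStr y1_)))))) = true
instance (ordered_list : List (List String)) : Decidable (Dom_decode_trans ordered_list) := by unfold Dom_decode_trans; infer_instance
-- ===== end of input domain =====

-- B replaces A's destructive pop(0) rounds with an index-based readout (shortest column length n,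
-- n full rows, then the partial row up to the first shortest column); same return value, and B
-- does not mutate its argument (A empties the inner lists in place — return-value equivalence only).

-- ===== PORT A =====
-- one round of `for element in ordered_list: trans_string += element.pop(0)`:
-- the cells popped before a possible IndexError, and (if no IndexError) the lists after the pops
def rowA : List (List String) → List String × Option (List (List String))
  | [] => ([], some [])
  | col :: t =>
    match col with
    | [] => ([], none)
    | x :: xs =>
      let (s, r) := rowA t
      (x :: s, r.map (fun l => xs :: l))

def pvSumLen (ls : List (List String)) : Nat := (ls.map List.length).sum

-- a completed round pops one cell from each column (needed for termination of loopA)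
theorem rowA_some_sum : ∀ (ls : List (List String)) s ls', rowA ls = (s, some ls') → pvSumLen ls' + ls.length = pvSumLen ls := by
  intro ls
  induction ls with
  | nil => intro s ls' h; simp [rowA] at h; simp [h.2, pvSumLen]
  | cons col t ih =>
    intro s ls' h
    match col with
    | [] => simp [rowA] at h
    | x :: xs =>
      simp only [rowA] at h
      rcases hr : rowA t with ⟨s', r⟩
      rw [hr] at h
      match r with
      | none => simp at h
      | some l'' =>
        simp at h
        obtain ⟨-, h2⟩ := h
        have := ih s' l'' (by rw [hr])
        subst h2
        simp [pvSumLen] at this ⊢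
        omega

-- the `while ordered_list:` loop; trans_string += each popped cell, return on IndexError
def loopA : List (List String) → String → String
  | [], acc => acc
  | col :: t, acc =>
    match _h : rowA (col :: t) with
    | (s, none) => s.foldl (fun a e => a ++ e) acc
    | (s, some ls') => loopA ls' (s.foldl (fun a e => a ++ e) acc)
  termination_by ls _ => pvSumLen ls
  decreasing_by
    have := rowA_some_sum (col :: t) s ls' _h
    simp at this ⊢
    omega

def decode_trans (ordered_list : List (List String)) : Option String :=
  if ordered_list.isEmpty then none else some (loopA ordered_list "")

-- ===== PORT B =====
-- n = min(len(col) for col in ordered_list)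
def minLenB (ls : List (List String)) : Nat :=
  (PySem.List.min? (ls.map (fun c => c.length)) (fun x => x)).getD 0

-- full = [col[i] for i in range(n) for col in ordered_list]  (col.getD i "" is exact: 0 ≤ i < n ≤ len col)
def fullB (ls : List (List String)) (n : Nat) : List String :=
  (List.range n).flatMap (fun i => ls.map (fun col => col.getD i ""))

-- the for/break loop collecting the partial row (col.getD n "" is exact: len col > n before the break)
def restB (n : Nat) : List (List String) → List String
  | [] => []
  | col :: t => if col.length = n then [] else col.getD n "" :: restB n t

def decode_trans_alt (ordered_list : List (List String)) : Option String :=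
  if ordered_list.isEmpty then none
  else
    let n := minLenB ordered_list
    some (PySem.Str.join "" (fullB ordered_list n ++ restB n ordered_list))

-- ===== PRECONDITION & SPEC =====
def Spec_decode_trans (ordered_list : List (List String)) (out : Option String) : Prop := out = decode_trans_alt ordered_list
instance (ordered_list : List (List String)) (out : Option String) : Decidable (Spec_decode_trans ordered_list out) := by unfold Spec_decode_trans; infer_instance

-- ===== CLAIM (what is proved, stated in full; the proofs are below) =====
def Claim_equal_decode_trans : Prop := ∀ (ordered_list : List (List String)), Dom_decode_trans ordered_list → Spec_decode_trans ordered_list (decode_trans ordered_list)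

-- ===== LEMMAS AND PROOFS =====

theorem join0_nil : PySem.Str.join "" [] = "" := by decide

theorem join0_cons (x : String) (t : List String) : PySem.Str.join "" (x :: t) = x ++ PySem.Str.join "" t := by
  apply String.ext
  simp [PySem.Str.join, PySem.Chars.join, List.intercalate, String.toList_ofList]
  cases t <;> simp

theorem join0_append (a b : List String) : PySem.Str.join "" (a ++ b) = PySem.Str.join "" a ++ PySem.Str.join "" b := by
  induction a with
  | nil => simp [join0_nil]
  | cons x t ih => simp [join0_cons, ih, String.append_assoc]

theorem foldl_append_join (s : List String) (acc : String) :
    s.foldl (fun a e => a ++ e) acc = acc ++ PySem.Str.join "" s := by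
  induction s generalizing acc with
  | nil => simp [join0_nil]
  | cons x t ih => simp only [List.foldl_cons, ih, join0_cons, String.append_assoc]

theorem minLenB_spec (ls : List (List String)) (h : ls ≠ []) :
    (∃ c ∈ ls, c.length = minLenB ls) ∧ ∀ c ∈ ls, minLenB ls ≤ c.length := by
  rcases hm : PySem.List.min? (ls.map (fun c => c.length)) (fun x => x) with _ | m
  · rw [PySem.List.min?_eq_none_iff] at hm
    simp_all
  · have hmem := PySem.List.min?_mem hm
    have hmin := PySem.List.min?_isMin hm
    simp only [List.mem_map] at hmem
    obtain ⟨c, hc, hcl⟩ := hmem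
    refine ⟨⟨c, hc, by simp [minLenB, hm, hcl]⟩, ?_⟩
    intro d hd
    have := hmin d.length (List.mem_map_of_mem hd)
    simpa [minLenB, hm] using this

-- a column is empty iff the minimum length is 0
theorem minLenB_zero_iff (ls : List (List String)) (h : ls ≠ []) : minLenB ls = 0 ↔ [] ∈ ls := by
  obtain ⟨⟨c, hc, hcl⟩, hmin⟩ := minLenB_spec ls h
  constructor
  · intro h0
    rw [h0] at hcl
    rw [List.length_eq_zero_iff] at hcl
    exact hcl ▸ hc
  · intro hnil
    have := hmin [] hnil
    simpa using this

theorem minLenB_tail (ls : List (List String)) (hne : ls ≠ []) (_h : ∀ c ∈ ls, c ≠ []) :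
    minLenB (ls.map (fun c => c.tail)) = minLenB ls - 1 := by
  have hne' : ls.map (fun c => c.tail) ≠ [] := by simpa using hne
  obtain ⟨⟨c, hc, hcl⟩, hmin⟩ := minLenB_spec ls hne
  obtain ⟨⟨d, hd, hdl⟩, hmin'⟩ := minLenB_spec _ hne'
  simp only [List.mem_map] at hd
  obtain ⟨d0, hd0, rfl⟩ := hd
  have h1 : minLenB (ls.map (fun c => c.tail)) ≤ minLenB ls - 1 := by
    have := hmin' c.tail (List.mem_map_of_mem hc)
    simp only [List.length_tail] at this
    omega
  have h2 : minLenB ls ≤ d0.length := hmin d0 hd0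
  have h3 : d0.tail.length = d0.length - 1 := by simp
  omega

theorem rowA_none (ls : List (List String)) (h : [] ∈ ls) : rowA ls = (restB 0 ls, none) := by
  induction ls with
  | nil => simp at h
  | cons col t ih =>
    match col with
    | [] => simp [rowA, restB]
    | x :: xs =>
      have ht : [] ∈ t := by simpa using h
      simp [rowA, ih ht, restB, List.getD]

theorem rowA_heads (ls : List (List String)) (h : ∀ c ∈ ls, c ≠ []) :
    rowA ls = (ls.map (fun c => c.headD ""), some (ls.map (fun c => c.tail))) := by
  induction ls with
  | nil => simp [rowA]
  | cons col t ih =>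
    match col with
    | [] => exact absurd rfl (h [] (by simp))
    | x :: xs =>
      have ht : ∀ c ∈ t, c ≠ [] := fun c hc => h c (by simp [hc])
      simp [rowA, ih ht]

theorem restB_tail (n : Nat) (ls : List (List String)) (hn : 1 ≤ n) (h : ∀ c ∈ ls, c ≠ []) :
    restB (n - 1) (ls.map (fun c => c.tail)) = restB n ls := by
  induction ls with
  | nil => simp [restB]
  | cons col t ih =>
    match col with
    | [] => exact absurd rfl (h [] (by simp))
    | x :: xs =>
      have ht : ∀ c ∈ t, c ≠ [] := fun c hc => h c (by simp [hc])
      simp only [List.map_cons, restB, List.tail_cons, List.length_cons]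
      by_cases hx : xs.length + 1 = n
      · rw [if_pos (by omega), if_pos hx]
      · rw [if_neg (by omega), if_neg hx, ih ht]
        congr 1
        obtain ⟨m, rfl⟩ : ∃ m, n = m + 1 := ⟨n - 1, by omega⟩
        simp [List.getD]

theorem fullB_tail (ls : List (List String)) (n : Nat) :
    fullB ls (n + 1) = ls.map (fun c => c.headD "") ++ fullB (ls.map (fun c => c.tail)) n := by
  unfold fullB
  rw [List.range_succ_eq_map]
  simp only [List.flatMap_cons, List.flatMap_map]
  congr 1
  · apply List.map_congr_left
    intro c _
    match c with
    | [] => simp [List.getD]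
    | x :: xs => simp [List.getD]
  · congr 1
    funext i
    simp only [List.map_map]
    apply List.map_congr_left
    intro c _
    simp [List.getD]

theorem loopA_cons_none (col : List String) (t : List (List String)) (s : List String) (acc : String)
    (h : rowA (col :: t) = (s, none)) : loopA (col :: t) acc = s.foldl (fun a e => a ++ e) acc := by
  rw [loopA]
  split <;> rename_i heq <;> rw [h] at heq <;> simp_all

theorem loopA_cons_some (col : List String) (t : List (List String)) (s : List String)
    (ls' : List (List String)) (acc : String)
    (h : rowA (col :: t) = (s, some ls')) :
    loopA (col :: t) acc = loopA ls' (s.foldl (fun a e => a ++ e) acc) := by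
  rw [loopA]
  split <;> rename_i heq <;> rw [h] at heq <;> simp_all

theorem loopA_eq (N : Nat) : ∀ (ls : List (List String)), pvSumLen ls ≤ N → ls ≠ [] → ∀ acc,
    loopA ls acc = acc ++ PySem.Str.join "" (fullB ls (minLenB ls) ++ restB (minLenB ls) ls) := by
  induction N with
  | zero =>
    intro ls hN hne acc
    match ls with
    | col :: t =>
      have hcol : col = [] := by
        cases col with
        | nil => rfl
        | cons x xs => simp [pvSumLen] at hN
      subst hcol
      have hmem : ([] : List String) ∈ ([] :: t : List (List String)) := by simp
      have hz : minLenB ([] :: t) = 0 := (minLenB_zero_iff _ hne).mpr hmem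
      rw [loopA_cons_none _ _ _ _ (rowA_none _ hmem), foldl_append_join, hz]
      simp [fullB]
  | succ N ih =>
    intro ls hN hne acc
    match ls with
    | col :: t =>
      by_cases hmem : ([] : List String) ∈ (col :: t : List (List String))
      · have hz : minLenB (col :: t) = 0 := (minLenB_zero_iff _ hne).mpr hmem
        rw [loopA_cons_none _ _ _ _ (rowA_none _ hmem), foldl_append_join, hz]
        simp [fullB]
      · have hall : ∀ c ∈ (col :: t : List (List String)), c ≠ [] := by
          intro c hc hceq; exact hmem (hceq ▸ hc)
        have hz : minLenB (col :: t) ≠ 0 := fun h0 => hmem ((minLenB_zero_iff _ hne).mp h0)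
        have hrow := rowA_heads _ hall
        rw [loopA_cons_some _ _ _ _ _ hrow, foldl_append_join]
        have hsum := rowA_some_sum _ _ _ hrow
        have hne' : (col :: t).map (fun c => c.tail) ≠ [] := by simp
        have hN' : pvSumLen ((col :: t).map (fun c => c.tail)) ≤ N := by
          simp only [List.length_cons] at hsum; omega
        rw [ih _ hN' hne']
        rw [minLenB_tail _ hne hall, restB_tail _ _ (by omega) hall]
        have hn1 : minLenB (col :: t) = (minLenB (col :: t) - 1) + 1 := by omega
        rw [String.append_assoc, ← join0_append]
        congr 2
        rw [hn1, fullB_tail]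
        simp [List.append_assoc]

-- ===== VERDICT (by name: the statement is the Claim_ definition above) =====
theorem decode_trans_spec : Claim_equal_decode_trans := by
  intro ls _
  unfold Spec_decode_trans decode_trans decode_trans_alt
  by_cases h : ls.isEmpty
  · simp [h]
  · simp only [h, Bool.false_eq_true, reduceIte]
    have hne : ls ≠ [] := by simpa [List.isEmpty_iff] using h
    rw [loopA_eq (pvSumLen ls) ls le_rfl hne ""]
    simp
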